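-- pv_equiv track=rewrite | github.com/DreamMavpa/Test_performance_lab | task1/task1#.py | answer
-- ===== SOURCE A (Python) =====
-- class My_Array:
--     def __init__(self, n):
--         self.n: int = n
--         self.num: int = 1
--
--     def __iter__(self):
--         return self
--
--     def __next__(self) -> int:
--         return self.next()
--
--     def next(self) -> int:
--         if self.num < self.n:
--             pointer, self.num = self.num, self.num + 1
--         else:
--             pointer, self.num = self.num, 1
--
--         return pointer
--
-- def answer(n, m):
--     if m > n:
--         m = m % n
--         if m == 0:
--             m = n
--
--     my_arr = My_Array(n)
--     pointer = next(my_arr)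
--     path = [pointer]
--
--     for _ in range(m-1):
--         pointer = next(my_arr)
--
--     if pointer == 1:
--         return "".join([str(x) for x in path])
--     path.append(pointer)
--
--     while pointer != 1:
--         for _ in range(m-1):
--             pointer = next(my_arr)
--         if pointer != 1:
--             path.append(pointer)
--
--     return "".join([str(x) for x in path])
-- ===== SOURCE B (Python) =====
-- def answer(n, m):
--     # Jump directly by (m-1) mod n per recorded position instead of simulating
--     # every single step through an iterator object.
--     if n <= 0 or m <= 1:
--         return "1"
--     s = (m - 1) % n
--     out = []
--     p = 1
--     while True:
--         out.append(str(p))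
--         p = (p - 1 + s) % n + 1
--         if p == 1:
--             break
--     return "".join(out)
-- ===== Notes on version B (the rewrite author's own statement) =====
-- stated objective: faster
-- what changed: B replaces the iterator object that simulates every single step around the circle with one modular jump of (m-1) mod n per recorded position, so each visited position costs O(1) instead of O(m).
import Mathlib
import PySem

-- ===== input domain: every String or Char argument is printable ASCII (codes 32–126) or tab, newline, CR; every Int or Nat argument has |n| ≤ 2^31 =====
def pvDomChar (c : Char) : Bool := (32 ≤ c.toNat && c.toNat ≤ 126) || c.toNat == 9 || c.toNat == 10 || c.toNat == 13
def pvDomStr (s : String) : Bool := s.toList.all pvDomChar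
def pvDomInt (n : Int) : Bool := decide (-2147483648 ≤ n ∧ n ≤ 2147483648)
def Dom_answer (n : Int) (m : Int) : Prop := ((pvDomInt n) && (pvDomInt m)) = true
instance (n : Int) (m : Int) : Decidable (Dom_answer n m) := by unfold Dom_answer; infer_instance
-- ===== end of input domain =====

-- B replaces A's per-single-step iterator simulation with one modular jump of (m-1) mod n
-- per recorded position (objective: faster; a timing run measures the claim).

-- ===== PORT A =====
-- My_Array.next: returns current num, advances num (wrap at n).
def nextA (n : Int) (num : Int) : Int × Int :=
  if num < n then (num, num + 1) else (num, 1)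

-- 'for _ in range(m-1): pointer = next(my_arr)'
def forSteps (n : Int) : Nat → Int → Int → Int × Int
  | 0, p, num => (p, num)
  | k+1, _, num => forSteps n k (nextA n num).1 (nextA n num).2

-- the 'while pointer != 1' loop; fuel only makes it total (never exhausted on admitted inputs)
def whileA (n : Int) (k : Nat) : Nat → Int → Int → List Int → List Int
  | 0, _, _, path => path
  | f+1, p, num, path =>
    if p = 1 then path
    else
      let st := forSteps n k p num
      whileA n k f st.1 st.2 (if st.1 ≠ 1 then path ++ [st.1] else path)

def answer (n : Int) (m : Int) : String :=
  let m' := if m > n then (let r := PySem.Int.mod m n; if r = 0 then n else r) else m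
  let st := nextA n 1
  let path : List Int := [st.1]
  let st2 := forSteps n (m' - 1).toNat st.1 st.2
  if st2.1 = 1 then String.join (path.map PySem.Int.toStr)
  else
    String.join ((whileA n (m' - 1).toNat n.toNat st2.1 st2.2 (path ++ [st2.1])).map PySem.Int.toStr)

-- ===== PORT B =====
-- 'while True: out.append(str(p)); p = (p-1+s) % n + 1; if p == 1: break'
def whileB (n : Int) (s : Int) : Nat → Int → List String → List String
  | 0, _, out => out
  | f+1, p, out =>
    let out' := out ++ [PySem.Int.toStr p]
    let p' := PySem.Int.mod (p - 1 + s) n + 1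
    if p' = 1 then out' else whileB n s f p' out'

def answer_alt (n : Int) (m : Int) : String :=
  if n ≤ 0 ∨ m ≤ 1 then "1"
  else String.join (whileB n (PySem.Int.mod (m - 1) n) (n.toNat + 1) 1 [])

-- ===== PRECONDITION & SPEC =====
-- Pre_ excludes exactly n = 0 with m > 0, where A raises ZeroDivisionError at 'm % n'.
def Pre_answer (n : Int) (m : Int) : Prop := ¬ (n = 0 ∧ 0 < m)
instance (n : Int) (m : Int) : Decidable (Pre_answer n m) := by unfold Pre_answer; infer_instance
def pvWitness_answer : Int × Int := (5, 3)

def Spec_answer (n : Int) (m : Int) (out : String) : Prop := out = answer_alt n m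
instance (n : Int) (m : Int) (out : String) : Decidable (Spec_answer n m out) := by unfold Spec_answer; infer_instance

-- ===== CLAIM (what is proved, stated in full; the proofs are below) =====
def Claim_equal_answer : Prop := ∀ (n : Int) (m : Int), Dom_answer n m → Pre_answer n m → Spec_answer n m (answer n m)

-- ===== LEMMAS AND PROOFS =====

-- successor state of My_Array after it has just returned p (for 1 ≤ p ≤ n)
def gnext (n : Int) (p : Int) : Int := p % n + 1

-- B's jump
def jmp (n : Int) (s : Int) (p : Int) : Int := (p - 1 + s) % n + 1

theorem gnext_eq (n p : Int) (h1 : 1 ≤ p) (h2 : p ≤ n) :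
    gnext n p = if p < n then p + 1 else 1 := by
  unfold gnext
  by_cases h : p < n
  · rw [Int.emod_eq_of_lt (by omega) h]; simp [h]
  · have hpn : p = n := by omega
    subst hpn
    simp [Int.emod_self]

theorem nextA_state (n p : Int) (h1 : 1 ≤ p) (h2 : p ≤ n) :
    nextA n (gnext n p) = (gnext n p, gnext n (gnext n p)) := by
  have hn : 1 ≤ n := le_trans h1 h2
  have hg : gnext n p = if p < n then p + 1 else 1 := gnext_eq n p h1 h2
  have hb1 : 1 ≤ gnext n p := by rw [hg]; split <;> omega
  have hb2 : gnext n p ≤ n := by rw [hg]; split <;> omega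
  rw [gnext_eq n (gnext n p) hb1 hb2]
  unfold nextA
  split <;> simp_all

theorem gnext_bounds (n p : Int) (hn : 0 < n) : 1 ≤ gnext n p ∧ gnext n p ≤ n := by
  unfold gnext
  have := Int.emod_nonneg p (by omega : n ≠ 0)
  have := Int.emod_lt_of_pos p hn
  omega

theorem jmp_bounds (n s p : Int) (hn : 0 < n) : 1 ≤ jmp n s p ∧ jmp n s p ≤ n := by
  unfold jmp
  have := Int.emod_nonneg (p - 1 + s) (by omega : n ≠ 0)
  have := Int.emod_lt_of_pos (p - 1 + s) hn
  omega

-- closed form of k single steps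
theorem forSteps_eq (n : Int) (hn : 1 ≤ n) :
    ∀ (k : Nat) (p : Int), 1 ≤ p → p ≤ n →
      forSteps n k p (gnext n p) =
        (((p - 1 + (k : Int)) % n + 1), gnext n ((p - 1 + (k : Int)) % n + 1)) := by
  intro k
  induction k with
  | zero =>
    intro p h1 h2
    have h0 : (p - 1) % n = p - 1 := Int.emod_eq_of_lt (by omega) (by omega)
    simp [forSteps, h0]
  | succ k ih =>
    intro p h1 h2
    have hst := nextA_state n p h1 h2
    have hb := gnext_bounds n p (by omega)
    have heq : forSteps n (k+1) p (gnext n p) = forSteps n k (gnext n p) (gnext n (gnext n p)) := by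
      simp [forSteps, hst]
    rw [heq, ih (gnext n p) hb.1 hb.2]
    have harith : (gnext n p - 1 + (k : Int)) % n = (p - 1 + ((k:Int) + 1)) % n := by
      unfold gnext
      have h1' : (p % n + 1 - 1 + (k : Int)) = p % n + (k : Int) := by ring
      rw [h1']
      conv_lhs => rw [Int.add_emod, Int.emod_emod_of_dvd p (dvd_refl n), ← Int.add_emod]
      ring_nf
    rw [harith]
    push_cast
    ring_nf

-- closed form of j B-jumps
theorem jmp_iter (n s : Int) (hn : 1 ≤ n) :
    ∀ (j : Nat) (p : Int), 1 ≤ p → p ≤ n →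
      (jmp n s)^[j] p = (p - 1 + (j : Int) * s) % n + 1 := by
  intro j
  induction j with
  | zero =>
    intro p h1 h2
    have h0 : (p - 1) % n = p - 1 := Int.emod_eq_of_lt (by omega) (by omega)
    simp [h0]
  | succ j ih =>
    intro p h1 h2
    rw [Function.iterate_succ_apply]
    have hb := jmp_bounds n s p (by omega)
    rw [ih (jmp n s p) hb.1 hb.2]
    have : (jmp n s p - 1 + (j : Int) * s) % n = (p - 1 + ((j:Int)+1) * s) % n := by
      unfold jmp
      have h1' : ((p - 1 + s) % n + 1 - 1 + (j : Int) * s) = (p - 1 + s) % n + (j:Int)*s := by ring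
      rw [h1']
      conv_lhs => rw [Int.add_emod, Int.emod_emod_of_dvd (p - 1 + s) (dvd_refl n), ← Int.add_emod]
      ring_nf
    rw [this]
    push_cast
    ring_nf

-- the two loops agree, given some number of jumps ≤ fuel returns to 1
theorem loop_eq (n s : Int) (hn : 1 ≤ n) (hs0 : 0 ≤ s) :
    ∀ (f : Nat) (p : Int) (path : List Int) (out : List String),
      1 ≤ p → p ≤ n → p ≠ 1 →
      (∃ j : Nat, 1 ≤ j ∧ j ≤ f ∧ (jmp n s)^[j] p = 1) →
      path.map PySem.Int.toStr = out ++ [PySem.Int.toStr p] →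
      (whileA n s.toNat f p (gnext n p) path).map PySem.Int.toStr = whileB n s f p out := by
  intro f
  induction f with
  | zero =>
    intro p path out _ _ _ hj _
    obtain ⟨j, hj1, hj2, _⟩ := hj
    omega
  | succ f ih =>
    intro p path out h1 h2 hne hj hmap
    obtain ⟨j, hj1, hj2, hjval⟩ := hj
    have hfs := forSteps_eq n hn s.toNat p h1 h2
    have hcast : ((s.toNat : Int)) = s := Int.toNat_of_nonneg hs0
    have hjmp : forSteps n s.toNat p (gnext n p) = (jmp n s p, gnext n (jmp n s p)) := by
      rw [hfs, hcast]; rfl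
    have hmod : PySem.Int.mod (p - 1 + s) n = (p - 1 + s) % n :=
      PySem.Int.mod_eq_emod_of_pos (by omega)
    have hb := jmp_bounds n s p (by omega)
    by_cases hp1 : jmp n s p = 1
    · -- loop ends: A appends nothing and exits on the next check; B breaks now
      have hA : whileA n s.toNat (f+1) p (gnext n p) path = path := by
        rw [whileA]
        simp only [hne, if_neg hne, hjmp]
        simp only [hp1]
        cases f with
        | zero => simp [whileA]
        | succ f => simp [whileA]
      have hB : whileB n s (f+1) p out = out ++ [PySem.Int.toStr p] := by
        rw [whileB]
        have : PySem.Int.mod (p - 1 + s) n + 1 = 1 := by rw [hmod]; exact hp1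
        simp [this]
      rw [hA, hB, hmap]
    · -- loop continues
      have hA : whileA n s.toNat (f+1) p (gnext n p) path =
          whileA n s.toNat f (jmp n s p) (gnext n (jmp n s p)) (path ++ [jmp n s p]) := by
        rw [whileA]
        simp only [if_neg hne, hjmp]
        simp [hp1]
      have hB : whileB n s (f+1) p out =
          whileB n s f (jmp n s p) (out ++ [PySem.Int.toStr p]) := by
        rw [whileB]
        have : PySem.Int.mod (p - 1 + s) n + 1 = jmp n s p := by rw [hmod]; rfl
        simp [this, hp1]
      rw [hA, hB]
      have hj' : ∃ j' : Nat, 1 ≤ j' ∧ j' ≤ f ∧ (jmp n s)^[j'] (jmp n s p) = 1 := by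
        refine ⟨j - 1, ?_, by omega, ?_⟩
        · -- j ≠ 1 since jmp p ≠ 1
          rcases Nat.eq_or_lt_of_le hj1 with h | h
          · exfalso; apply hp1; rw [← hjval, ← h]; simp
          · omega
        · have : (jmp n s)^[j - 1] (jmp n s p) = (jmp n s)^[j] p := by
            rw [← Function.iterate_succ_apply]
            congr 1
            omega
          rw [this]; exact hjval
      exact ih (jmp n s p) (path ++ [jmp n s p]) (out ++ [PySem.Int.toStr p]) hb.1 hb.2 hp1 hj'
        (by rw [List.map_append, hmap]; rfl)

-- when the pointer never leaves 1 (n ≤ 1): forSteps is the identity on state (1,1)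
theorem forSteps_one (n : Int) (hn : n ≤ 1) : ∀ k : Nat, forSteps n k 1 1 = (1, 1) := by
  intro k
  induction k with
  | zero => rfl
  | succ k ih =>
    have h1 : ¬ ((1:Int) < n) := by omega
    have hst : nextA n 1 = (1, 1) := by unfold nextA; simp [h1]
    simp [forSteps, hst, ih]

-- reduction of m in A equals (m-1) mod n + 1 (for n ≥ 1, m ≥ 2)
theorem reduce_eq (n m : Int) (hn : 1 ≤ n) (hm : 2 ≤ m) :
    (if m > n then (let r := PySem.Int.mod m n; if r = 0 then n else r) else m) - 1
      = (m - 1) % n := by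
  have hmod : PySem.Int.mod m n = m % n := PySem.Int.mod_eq_emod_of_pos (by omega)
  have h0 : 0 ≤ m % n := Int.emod_nonneg m (by omega)
  have hlt : m % n < n := Int.emod_lt_of_pos m (by omega)
  have key : ∀ x : Int, 0 ≤ x → x < n → (n : Int) ∣ (m - 1) - x → (m - 1) % n = x := by
    intro x hx1 hx2 hdvd
    have := Int.emod_emod_of_dvd (m - 1) (dvd_refl n)
    obtain ⟨q, hq⟩ := hdvd
    have hqx : m - 1 = x + n * q := by omega
    rw [hqx, Int.add_mul_emod_self_left]
    exact Int.emod_eq_of_lt hx1 hx2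
  have hself : n ∣ m - m % n := by
    have hdiv := Int.emod_add_ediv m n
    exact ⟨m / n, by omega⟩
  by_cases hgt : m > n
  · simp only [if_pos hgt, hmod]
    by_cases hr : m % n = 0
    · simp only [if_pos hr]
      refine (key (n - 1) (by omega) (by omega) ?_).symm
      have : (m - 1) - (n - 1) = (m - m % n) - n + m % n := by omega
      rw [this]
      exact dvd_add (dvd_sub hself dvd_rfl) (by rw [hr]; exact dvd_zero n)
    · simp only [if_neg hr]
      refine (key (m % n - 1) (by omega) (by omega) ?_).symm
      have : (m - 1) - (m % n - 1) = m - m % n := by ring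
      rw [this]; exact hself
  · simp only [if_neg hgt]
    exact (Int.emod_eq_of_lt (by omega) (by omega)).symm

-- ===== VERDICT (by name: the statement is the Claim_ definition above) =====
-- first call of next() from the initial state
theorem nextA_init (n : Int) (hn : 1 ≤ n) : nextA n 1 = (1, gnext n 1) := by
  have hg : gnext n 1 = if (1:Int) < n then 1 + 1 else 1 := gnext_eq n 1 le_rfl hn
  unfold nextA
  split <;> simp_all

theorem join_one : String.join [PySem.Int.toStr 1] = "1" := by decide

theorem answer_spec : Claim_equal_answer := by
  intro n m _ hpre
  unfold Spec_answer answer answer_alt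
  by_cases hn : n ≤ 0
  · -- n ≤ 0: the iterator is stuck at 1, A returns "1" immediately; B's guard returns "1"
    have hlt : ¬ ((1:Int) < n) := by omega
    have hA1 : nextA n 1 = (1, 1) := by unfold nextA; simp [hlt]
    have hor : n ≤ 0 ∨ m ≤ 1 := Or.inl hn
    simp only [hA1, if_pos hor, forSteps_one n (by omega)]
    simp [join_one]
  · push_neg at hn
    have hn1 : 1 ≤ n := by omega
    by_cases hm : m ≤ 1
    · -- m ≤ 1: range(m-1) is empty, pointer stays 1
      have hmn : ¬ (m > n) := by omega
      have hk : (m - 1).toNat = 0 := by omega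
      have hor : n ≤ 0 ∨ m ≤ 1 := Or.inr hm
      simp only [if_neg hmn, hk, nextA_init n hn1, if_pos hor, forSteps]
      simp [join_one]
    · -- main case: n ≥ 1, m ≥ 2
      push_neg at hm
      have hm2 : 2 ≤ m := by omega
      set s : Int := (m - 1) % n with hs
      have hs0 : 0 ≤ s := Int.emod_nonneg _ (by omega)
      have hsn : s < n := Int.emod_lt_of_pos _ (by omega)
      have hred : (if m > n then (let r := PySem.Int.mod m n; if r = 0 then n else r) else m) - 1 = s :=
        reduce_eq n m hn1 hm2
      have hktoNat : ((if m > n then (let r := PySem.Int.mod m n; if r = 0 then n else r) else m) - 1).toNat = s.toNat := by rw [hred]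
      have hcast : ((s.toNat : Int)) = s := Int.toNat_of_nonneg hs0
      have hBmod : PySem.Int.mod (m - 1) n = s := PySem.Int.mod_eq_emod_of_pos (by omega)
      have hnor : ¬ (n ≤ 0 ∨ m ≤ 1) := by omega
      have hfs : forSteps n s.toNat 1 (gnext n 1) = (s + 1, gnext n (s + 1)) := by
        rw [forSteps_eq n hn1 s.toNat 1 le_rfl hn1, hcast]
        have : (1 - 1 + s) % n = s := by
          rw [show (1 - 1 + s) = s by ring]
          exact Int.emod_eq_of_lt hs0 hsn
        rw [this]
      have hjmp1 : PySem.Int.mod (1 - 1 + s) n + 1 = s + 1 := by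
        rw [PySem.Int.mod_eq_emod_of_pos (by omega), show (1 - 1 + s) = s by ring,
          Int.emod_eq_of_lt hs0 hsn]
      simp only [nextA_init n hn1, hktoNat, hfs, if_neg hnor, hBmod]
      by_cases hsz : s = 0
      · -- m-1 divisible by n: single-element path "1"
        have h11 : s + 1 = 1 := by omega
        rw [if_pos h11]
        rw [show (n.toNat + 1) = Nat.succ n.toNat from rfl, whileB]
        simp only [hjmp1, h11]
        simp [join_one]
      · -- s ≥ 1 (hence n ≥ 2): both loops run
        have hs1 : 1 ≤ s := by omega
        have hpos1 : s + 1 ≠ 1 := by omega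
        have hn2 : 2 ≤ n := by omega
        rw [if_neg hpos1]
        rw [show (n.toNat + 1) = Nat.succ n.toNat from rfl, whileB]
        simp only [hjmp1, if_neg hpos1, List.nil_append]
        have hloop := loop_eq n s hn1 hs0 n.toNat (s + 1) ([1] ++ [s + 1]) [PySem.Int.toStr 1]
          (by omega) (by omega) hpos1 ?_ (by simp)
        · rw [hloop]
        · refine ⟨n.toNat - 1, by omega, by omega, ?_⟩
          have hb : 1 ≤ s + 1 ∧ s + 1 ≤ n := by omega
          rw [jmp_iter n s hn1 (n.toNat - 1) (s + 1) hb.1 hb.2]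
          have hc : ((n.toNat - 1 : Nat) : Int) = n - 1 := by omega
          rw [hc, show (s + 1 - 1 + (n - 1) * s) = n * s by ring, Int.mul_emod_right]
          norm_num
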